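-- pv_equiv track=rewrite | github.com/TrellixVulnTeam/monorail_3DR3 | appengine/monorail/tracker/tracker_bizobj.py | _CombineOrderedLists
-- ===== SOURCE A (Python) =====
-- def _CombineOrderedLists(
--     list_of_lists, include_duplicate_keys=False, key=lambda x: x):
--   """Combine lists of items while maintaining their desired order.
--
--   Args:
--     list_of_lists: a list of lists of strings.
--     include_duplicate_keys: Pass True to make the combined list have the
--         same total number of elements as the sum of the input lists.
--     key: optional function to choose which part of the list items hold the
--         string used for comparison.  The result will have the whole items.
--
--   Returns:
--     A single list of items containing one copy of each of the items
--     in any of the original list, and in an order that maintains the original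
--     list ordering as much as possible.
--   """
--   combined_items = []
--   combined_keys = []
--   seen_keys_set = set()
--   for one_list in list_of_lists:
--     _AccumulateCombinedList(
--         one_list, combined_items, combined_keys, seen_keys_set, key=key,
--         include_duplicate_keys=include_duplicate_keys)
--
--   return combined_items
--
-- def _AccumulateCombinedList(
--     one_list, combined_items, combined_keys, seen_keys_set,
--     include_duplicate_keys=False, key=lambda x: x):
--   """Accumulate strings into a combined list while its maintaining ordering.
--
--   Args:
--     one_list: list of strings in a desired order.
--     combined_items: accumulated list of items in the desired order.
--     combined_keys: accumulated list of key strings in the desired order.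
--     seen_keys_set: set of strings that are already in combined_list.
--     include_duplicate_keys: Pass True to make the combined list have the
--         same total number of elements as the sum of the input lists.
--     key: optional function to choose which part of the list items hold the
--         string used for comparison.  The result will have the whole items.
--
--   Returns:
--     Nothing.  But, combined_items is modified to mix in all the items of
--     one_list at appropriate points such that nothing in combined_items
--     is reordered, and the ordering of items from one_list is maintained
--     as much as possible.  Also, seen_keys_set is modified to add any keys
--     for items that were added to combined_items.
--
--   Also, any strings that begin with "#" are compared regardless of the "#".
--   The purpose of such strings is to guide the final ordering.
--   """
--   insert_idx = 0
--   for item in one_list: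
--     s = key(item).lower()
--     if s in seen_keys_set:
--       item_idx = combined_keys.index(s)  # Need parallel list of keys
--       insert_idx = max(insert_idx, item_idx + 1)
--
--     if s not in seen_keys_set or include_duplicate_keys:
--       combined_items.insert(insert_idx, item)
--       combined_keys.insert(insert_idx, s)
--       insert_idx += 1
--
--     seen_keys_set.add(s)
-- ===== SOURCE B (Python) =====
-- def _CombineOrderedLists(
--     list_of_lists, include_duplicate_keys=False, key=lambda x: x):
--   """Combine ordered lists, dedup by lowercased key (same result as the original).
--
--   One forward merge pass per input list instead of per-item .index/.insert scans:
--   the combined list is an emitted prefix plus an untouched suffix tail; a matching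
--   key only advances the suffix pointer, moving the skipped block across once.
--   A global key->count dict stands in for per-pass membership scans.
--   """
--   combined_items = []
--   combined_keys = []
--   all_counts = {}
--   for one_list in list_of_lists:
--     em_items = []
--     em_keys = []
--     em_set = set()
--     suf_items = combined_items
--     suf_keys = combined_keys
--     pos = 0
--     for item in one_list:
--       s = key(item).lower()
--       if s not in em_set and all_counts.get(s, 0) > 0:
--         j = suf_keys.index(s, pos) + 1
--         em_items += suf_items[pos:j]
--         em_keys += suf_keys[pos:j]
--         em_set.update(suf_keys[pos:j])
--         pos = j
--         if include_duplicate_keys: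
--           em_items.append(item); em_keys.append(s)
--           all_counts[s] += 1
--       elif s in em_set:
--         if include_duplicate_keys:
--           em_items.append(item); em_keys.append(s)
--           all_counts[s] += 1
--       else:
--         em_items.append(item); em_keys.append(s); em_set.add(s)
--         all_counts[s] = all_counts.get(s, 0) + 1
--     combined_items = em_items + suf_items[pos:]
--     combined_keys = em_keys + suf_keys[pos:]
--   return combined_items
-- ===== Notes on version B (the rewrite author's own statement) =====
-- stated objective: faster
-- what changed: Replaces A's per-item combined_keys.index scans and list.insert shifts by one forward merge pass per input list (emitted prefix + untouched suffix with an advancing position, plus an incrementally maintained key-count dict), so the combined list is rebuilt once per list instead of shifted once per item.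
import Mathlib
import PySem

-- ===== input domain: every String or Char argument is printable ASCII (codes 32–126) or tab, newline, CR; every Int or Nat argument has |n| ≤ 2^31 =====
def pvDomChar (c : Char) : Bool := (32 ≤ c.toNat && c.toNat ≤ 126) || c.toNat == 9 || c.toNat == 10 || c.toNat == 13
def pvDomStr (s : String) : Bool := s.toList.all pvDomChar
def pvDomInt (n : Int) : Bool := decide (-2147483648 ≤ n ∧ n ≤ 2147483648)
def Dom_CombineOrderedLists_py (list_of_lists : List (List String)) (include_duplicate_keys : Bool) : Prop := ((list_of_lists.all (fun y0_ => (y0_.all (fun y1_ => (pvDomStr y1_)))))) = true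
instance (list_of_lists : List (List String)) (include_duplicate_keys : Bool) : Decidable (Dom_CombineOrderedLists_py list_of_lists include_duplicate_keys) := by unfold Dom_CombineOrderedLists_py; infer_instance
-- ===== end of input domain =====

-- B replaces A's per-item list.insert shifts and combined_keys.index scans by one forward
-- merge pass per input list over an emitted-prefix/untouched-suffix split of the combined
-- list, with a global key-count dict; the return value is proved identical.

-- ===== PORT A =====
-- A's inner loop body (_AccumulateCombinedList's 'for item in one_list'); state is
-- (combined_items, combined_keys, seen_keys_set, insert_idx).  'combined_keys.index(s)' is
-- only executed when s ∈ seen_keys_set, which (proved below) implies s ∈ combined_keys, so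
-- the '.getD 0' default of the Option-returning index? is never taken.
def pyStepA (dup : Bool)
    (st : List String × List String × PySem.Set String × Int) (item : String) :
    List String × List String × PySem.Set String × Int :=
  let ci := st.1
  let ck := st.2.1
  let seen := st.2.2.1
  let idx := st.2.2.2
  let s := PySem.Str.lower item
  let idx : Int := if PySem.Set.contains seen s
    then max idx ((((PySem.List.index? ck s).getD 0 : Nat) : Int) + 1)
    else idx
  if !(PySem.Set.contains seen s) || dup then
    (PySem.List.insert ci idx item, PySem.List.insert ck idx s, PySem.Set.add seen s, idx + 1)
  else
    (ci, ck, PySem.Set.add seen s, idx)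

def CombineOrderedLists_py (list_of_lists : List (List String)) (include_duplicate_keys : Bool) : List String :=
  (list_of_lists.foldl
    (fun acc one_list =>
      let r := one_list.foldl (pyStepA include_duplicate_keys) (acc.1, acc.2.1, acc.2.2, (0 : Int))
      (r.1, r.2.1, r.2.2.1))
    (([], [], PySem.Set.empty) : List String × List String × PySem.Set String)).1

-- ===== PORT B =====
-- Port of Source B's 'suf_keys.index(s, pos)' (list.index with a start argument; pos ≥ 0).
-- Source B only calls it when s occurs in suf_keys[pos:] (anything else would raise ValueError),
-- so the '.getD 0' default is never taken on reachable states.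
def pyIndexFrom (xs : List String) (v : String) (pos : Nat) : Nat :=
  pos + (PySem.List.index? (xs.drop pos) v).getD 0

-- Source B's 'for item in one_list' body.  suf_items/suf_keys are the pass-start combined lists
-- (read-only aliases in Source B); the mutable state is
-- (em_items, em_keys, em_set, pos, all_counts).
def stepB (dup : Bool) (sufI sufK : List String)
    (st : List String × List String × PySem.Set String × Int × PySem.Dict String Int)
    (item : String) :
    List String × List String × PySem.Set String × Int × PySem.Dict String Int :=
  let emI := st.1
  let emK := st.2.1
  let emSet := st.2.2.1
  let pos := st.2.2.2.1
  let cnt := st.2.2.2.2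
  let s := PySem.Str.lower item
  if PySem.Set.contains emSet s = false ∧ 0 < cnt.getD s 0 then
    let j : Int := ((pyIndexFrom sufK s pos.toNat : Nat) : Int) + 1
    let emI := emI ++ PySem.List.slice sufI (some pos) (some j)
    let emK' := emK ++ PySem.List.slice sufK (some pos) (some j)
    let emSet := PySem.Set.update emSet (PySem.List.slice sufK (some pos) (some j))
    if dup then
      (emI ++ [item], emK' ++ [s], emSet, j, cnt.insert s (cnt.getD s 0 + 1))
    else
      (emI, emK', emSet, j, cnt)
  else if PySem.Set.contains emSet s then
    if dup then
      (emI ++ [item], emK ++ [s], emSet, pos, cnt.insert s (cnt.getD s 0 + 1))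
    else
      st
  else
    (emI ++ [item], emK ++ [s], PySem.Set.add emSet s, pos, cnt.insert s (cnt.getD s 0 + 1))

def CombineOrderedLists_py_alt (list_of_lists : List (List String)) (include_duplicate_keys : Bool) : List String :=
  (list_of_lists.foldl
    (fun acc one_list =>
      let r := one_list.foldl (stepB include_duplicate_keys acc.1 acc.2.1)
        ([], [], PySem.Set.empty, (0 : Int), acc.2.2)
      (r.1 ++ PySem.List.slice acc.1 (some r.2.2.2.1) none,
       r.2.1 ++ PySem.List.slice acc.2.1 (some r.2.2.2.1) none,
       r.2.2.2.2))
    (([], [], PySem.Dict.empty) : List String × List String × PySem.Dict String Int)).1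

-- ===== PRECONDITION & SPEC =====
def Spec_CombineOrderedLists_py (list_of_lists : List (List String)) (include_duplicate_keys : Bool) (out : List String) : Prop := out = CombineOrderedLists_py_alt list_of_lists include_duplicate_keys
instance (list_of_lists : List (List String)) (include_duplicate_keys : Bool) (out : List String) : Decidable (Spec_CombineOrderedLists_py list_of_lists include_duplicate_keys out) := by unfold Spec_CombineOrderedLists_py; infer_instance

-- ===== CLAIM (what is proved, stated in full; the proofs are below) =====
def Claim_equal_CombineOrderedLists_py : Prop := ∀ (list_of_lists : List (List String)) (include_duplicate_keys : Bool), Dom_CombineOrderedLists_py list_of_lists include_duplicate_keys → Spec_CombineOrderedLists_py list_of_lists include_duplicate_keys (CombineOrderedLists_py list_of_lists include_duplicate_keys)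

-- ===== LEMMAS AND PROOFS =====

-- The coupling invariant between A's inner-loop state (combined_items, combined_keys,
-- seen_keys_set, insert_idx) and B's inner-loop state (em_items, em_keys, em_set, pos,
-- all_counts) relative to the pass-start combined lists sufI/sufK:
-- A's combined list is B's emitted prefix followed by the not-yet-passed suffix tail.
def InvAB (sufI sufK : List String)
    (stA : List String × List String × PySem.Set String × Int)
    (stB : List String × List String × PySem.Set String × Int × PySem.Dict String Int) :
    Prop :=
  0 ≤ stB.2.2.2.1 ∧
  stB.2.2.2.1.toNat ≤ sufK.length ∧
  stB.1.length = stB.2.1.length ∧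
  stA.1 = stB.1 ++ sufI.drop stB.2.2.2.1.toNat ∧
  stA.2.1 = stB.2.1 ++ sufK.drop stB.2.2.2.1.toNat ∧
  stA.2.2.2 = (stB.2.1.length : Int) ∧
  (∀ x, x ∈ stA.2.2.1 ↔ x ∈ stB.2.1 ++ sufK.drop stB.2.2.2.1.toNat) ∧
  (∀ x, x ∈ stB.2.2.1 ↔ x ∈ stB.2.1) ∧
  (∀ x, stB.2.2.2.2.getD x 0 = (((stB.2.1 ++ sufK.drop stB.2.2.2.1.toNat).count x : Nat) : Int))

theorem invAB_mk {sufI sufK ci ck : List String} {seen : PySem.Set String} {idx : Int}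
    {emI emK : List String} {emSet : PySem.Set String} {pos : Int}
    {cnt : PySem.Dict String Int}
    (H1 : 0 ≤ pos)
    (H2 : pos.toNat ≤ sufK.length)
    (H3 : emI.length = emK.length)
    (H4 : ci = emI ++ sufI.drop pos.toNat)
    (H5 : ck = emK ++ sufK.drop pos.toNat)
    (H6 : idx = (emK.length : Int))
    (H7 : ∀ x, x ∈ seen ↔ x ∈ emK ++ sufK.drop pos.toNat)
    (H8 : ∀ x, x ∈ emSet ↔ x ∈ emK)
    (H9 : ∀ x, cnt.getD x 0 = (((emK ++ sufK.drop pos.toNat).count x : Nat) : Int)) :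
    InvAB sufI sufK (ci, ck, seen, idx) (emI, emK, emSet, pos, cnt) :=
  ⟨H1, H2, H3, H4, H5, H6, H7, H8, H9⟩

set_option maxHeartbeats 1000000 in
theorem step_inv (dup : Bool) (item : String) (sufI sufK : List String)
    (hlen : sufI.length = sufK.length) (stA stB) (h : InvAB sufI sufK stA stB) :
    InvAB sufI sufK (pyStepA dup stA item) (stepB dup sufI sufK stB item) := by
  obtain ⟨ci, ck, seen, idx⟩ := stA
  obtain ⟨emI, emK, emSet, pos, cnt⟩ := stB
  obtain ⟨h1, h2, h3, h4, h5, h6, h7, h8, h9⟩ := h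
  simp only at h1 h2 h3 h4 h5 h6 h7 h8 h9
  have hdlen : (sufI.drop pos.toNat).length = (sufK.drop pos.toNat).length := by
    simp [hlen]
  by_cases hem : PySem.Str.lower item ∈ emK
  · -- key already among the emitted-prefix keys
    have hset : PySem.Set.contains emSet (PySem.Str.lower item) = true := by
      rw [PySem.Set.contains_iff]; exact (h8 _).mpr hem
    have hseen : PySem.Set.contains seen (PySem.Str.lower item) = true := by
      rw [PySem.Set.contains_iff]
      exact (h7 _).mpr (List.mem_append.mpr (Or.inl hem))
    -- the first occurrence of the key lies inside emK, so A's insert index stays emK.length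
    obtain ⟨j, hj⟩ : ∃ j, PySem.List.index? emK (PySem.Str.lower item) = some j :=
      Option.isSome_iff_exists.mp ((PySem.List.index?_isSome_iff _ _).mpr hem)
    obtain ⟨hjlt, -, -⟩ := PySem.List.getElem_of_index?_eq_some hj
    have hidx : PySem.List.index? ck (PySem.Str.lower item) = some j := by
      rw [h5, PySem.List.index?_append_of_mem _ hem, hj]
    have hmax : max idx ((j : Int) + 1) = (emK.length : Int) := by
      rw [h6]; omega
    have hins : ∀ (l1 l2 : List String) (v : String), l1.length = emK.length →
        PySem.List.insert (l1 ++ l2) (emK.length : Int) v = l1 ++ v :: l2 := by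
      intro l1 l2 v hl
      rw [← hl, PySem.List.insert_natCast _ _ _ (by simp), List.take_left, List.drop_left]
    have hcond : ¬ (PySem.Set.contains emSet (PySem.Str.lower item) = false ∧
        0 < cnt.getD (PySem.Str.lower item) 0) := by
      rintro ⟨hc, -⟩; rw [hset] at hc; cases hc
    simp only [pyStepA, stepB, hset, hseen, hidx, Option.getD_some, Bool.not_true,
      Bool.false_or, hmax, if_true]
    cases dup with
    | false =>
      simp only [Bool.false_eq_true, if_false]
      refine invAB_mk h1 h2 h3 h4 h5 rfl ?_ h8 h9
      intro x
      rw [PySem.Set.mem_add, h7 x]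
      constructor
      · rintro (hx | rfl)
        · exact hx
        · exact List.mem_append.mpr (Or.inl hem)
      · exact Or.inl
    | true =>
      simp only [if_true]
      refine invAB_mk h1 h2 (by simp [h3]) ?_ ?_ ?_ ?_ ?_ ?_
      · rw [h4, hins _ _ _ h3]; simp
      · rw [h5, hins _ _ _ rfl]; simp
      · simp only [List.length_append, List.length_cons, List.length_nil]
        push_cast; omega
      · intro x
        rw [PySem.Set.mem_add, h7 x]
        simp only [List.mem_append, List.mem_cons, List.not_mem_nil, or_false]
        tauto
      · intro x
        rw [h8 x]
        simp only [List.mem_append, List.mem_cons, List.not_mem_nil, or_false]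
        constructor
        · exact Or.inl
        · rintro (hx | hx)
          · exact hx
          · rw [hx]; exact hem
      · intro x
        simp only [PySem.Dict.getD_insert, h9]
        by_cases hx : x = PySem.Str.lower item
        · subst hx
          simp [List.count_append]
          try ring
          try omega
        · have hxx : ¬ PySem.Str.lower item = x := fun hh => hx hh.symm
          simp [List.count_append, hx, hxx]
          try push_cast
          try ring
          try omega
  · by_cases hsufd : PySem.Str.lower item ∈ sufK.drop pos.toNat
    · -- first occurrence of the key lies in the suffix: A's index jumps past it,
      -- B advances pos over the block ending at that occurrence
      have hset : PySem.Set.contains emSet (PySem.Str.lower item) = false := by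
        rw [← Bool.not_eq_true, PySem.Set.contains_iff]
        intro hc; exact hem ((h8 _).mp hc)
      have hseen : PySem.Set.contains seen (PySem.Str.lower item) = true := by
        rw [PySem.Set.contains_iff]
        exact (h7 _).mpr (List.mem_append.mpr (Or.inr hsufd))
      have hcnt : 0 < cnt.getD (PySem.Str.lower item) 0 := by
        rw [h9]
        have : 0 < (emK ++ sufK.drop pos.toNat).count (PySem.Str.lower item) :=
          List.count_pos_iff.mpr (List.mem_append.mpr (Or.inr hsufd))
        exact_mod_cast this
      have hcond : (PySem.Set.contains emSet (PySem.Str.lower item) = false ∧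
          0 < cnt.getD (PySem.Str.lower item) 0) := ⟨hset, hcnt⟩
      -- decompose the key suffix at the first occurrence of the key
      obtain ⟨k, hk⟩ : ∃ k,
          PySem.List.index? (sufK.drop pos.toNat) (PySem.Str.lower item) = some k :=
        Option.isSome_iff_exists.mp ((PySem.List.index?_isSome_iff _ _).mpr hsufd)
      obtain ⟨preK, restK, hdecK, hlenK, hnpK⟩ :=
        (PySem.List.index?_eq_some_iff _ _ _).mp hk
      have hfrom : pyIndexFrom sufK (PySem.Str.lower item) pos.toNat = pos.toNat + k := by
        simp only [pyIndexFrom]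
        rw [hk]
        rfl
      have hdropKlen : (sufK.drop pos.toNat).length = k + 1 + restK.length := by
        rw [hdecK]
        simp only [List.length_append, List.length_cons]
        omega
      have hj : (((pyIndexFrom sufK (PySem.Str.lower item) pos.toNat : Nat) : Int) + 1) =
          (((pos.toNat + k + 1 : Nat) : Int)) := by
        rw [hfrom]; push_cast; ring
      -- the moved block of keys is preK ++ [s]
      have hsliceK : PySem.List.slice sufK (some pos) (some ((pos.toNat + k + 1 : Nat) : Int)) =
          preK ++ [PySem.Str.lower item] := by
        rw [PySem.List.slice_toNat _ h1 (by positivity)]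
        have : ((pos.toNat + k + 1 : Nat) : Int).toNat - pos.toNat = k + 1 := by omega
        rw [this, hdecK, ← hlenK]
        have h' := List.take_left (l₁ := preK ++ [PySem.Str.lower item]) (l₂ := restK)
        simpa using h'
      -- the moved block of items is the matching take of the item suffix
      have hsliceI : PySem.List.slice sufI (some pos) (some ((pos.toNat + k + 1 : Nat) : Int)) =
          (sufI.drop pos.toNat).take (k + 1) := by
        rw [PySem.List.slice_toNat _ h1 (by positivity)]
        congr 1
        omega
      have hchunklen : ((sufI.drop pos.toNat).take (k + 1)).length = k + 1 := by
        rw [List.length_take]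
        omega
      have hdropI : sufI.drop pos.toNat =
          (sufI.drop pos.toNat).take (k + 1) ++ (sufI.drop pos.toNat).drop (k + 1) := by
        rw [List.take_append_drop]
      have hdropI' : sufI.drop ((pos.toNat + k + 1 : Nat) : Int).toNat =
          (sufI.drop pos.toNat).drop (k + 1) := by
        have htn : ((pos.toNat + k + 1 : Nat) : Int).toNat = pos.toNat + (k + 1) := by omega
        rw [htn, ← List.drop_drop]
      have hdropK' : sufK.drop ((pos.toNat + k + 1 : Nat) : Int).toNat = restK := by
        have htn2 : ((pos.toNat + k + 1 : Nat) : Int).toNat = pos.toNat + (k + 1) := by omega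
        rw [htn2, ← List.drop_drop, hdecK, ← hlenK]
        simp
      -- A's combined_keys.index(s) finds the occurrence at emK.length + k
      have hidx : PySem.List.index? ck (PySem.Str.lower item) = some (emK.length + k) := by
        rw [PySem.List.index?_eq_some_iff]
        refine ⟨emK ++ preK, restK, ?_, by simp [hlenK], ?_⟩
        · rw [h5, hdecK]; simp
        · intro hx
          rcases List.mem_append.mp hx with hx | hx
          · exact hem hx
          · exact hnpK hx
      have hmax : max idx (((emK.length + k : Nat) : Int) + 1) =
          (((emK.length + k + 1 : Nat) : Int)) := by
        rw [h6]; push_cast; omega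
      have hins : ∀ (l1 l2 : List String) (v : String), l1.length = emK.length + k + 1 →
          PySem.List.insert (l1 ++ l2) (((emK.length + k + 1 : Nat)) : Int) v =
            l1 ++ v :: l2 := by
        intro l1 l2 v hl
        rw [← hl, PySem.List.insert_natCast _ _ _ (by simp), List.take_left, List.drop_left]
      have hmemtot : ∀ x, x ∈ emK ++ sufK.drop pos.toNat ↔
          (x ∈ emK ∨ x ∈ preK ∨ x = PySem.Str.lower item ∨ x ∈ restK) := by
        intro x
        rw [hdecK]
        simp only [List.mem_append, List.mem_cons]
        try tauto
      have hsetmem : ∀ x, x ∈ PySem.Set.update emSet (preK ++ [PySem.Str.lower item]) ↔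
          (x ∈ emK ∨ x ∈ preK ∨ x = PySem.Str.lower item) := by
        intro x
        rw [PySem.Set.mem_update, h8 x]
        simp only [List.mem_append, List.mem_cons, List.not_mem_nil, or_false]
        try tauto
      have hcountsplit : ∀ x, (emK ++ sufK.drop pos.toNat).count x =
          ((emK ++ preK ++ [PySem.Str.lower item]).count x + restK.count x) := by
        intro x
        rw [hdecK]
        simp [List.count_append, List.count_cons]
        omega
      have hdl : (sufK.drop pos.toNat).length = sufK.length - pos.toNat := by simp
      simp only [pyStepA, stepB, hseen, hidx, Option.getD_some, Bool.not_true,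
        Bool.false_or, hmax, if_pos hcond, hj, hsliceK, hsliceI, if_true]
      cases dup with
      | false =>
        simp only [Bool.false_eq_true, if_false]
        refine invAB_mk (by omega) (by omega) ?_ ?_ ?_ ?_ ?_ ?_ ?_
        · simp only [List.length_append, h3, hchunklen, List.length_cons, List.length_nil]
          omega
        · rw [h4, hdropI', hdropI]; simp
        · rw [h5, hdropK', hdecK]; simp
        · simp only [List.length_append, List.length_cons, List.length_nil]
          push_cast; omega
        · intro x
          rw [PySem.Set.mem_add, h7 x, hmemtot x, hdropK']
          simp only [List.mem_append, List.mem_cons, List.not_mem_nil, or_false]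
          tauto
        · intro x
          rw [hsetmem x]
          simp only [List.mem_append, List.mem_cons, List.not_mem_nil, or_false]
          try tauto
        · intro x
          rw [h9, hdropK', hdecK]
          by_cases hx : x = PySem.Str.lower item
          · subst hx
            simp [List.count_append]
            try push_cast
            try ring
            try omega
          · have hxx : ¬ PySem.Str.lower item = x := fun hh => hx hh.symm
            simp [List.count_append, hxx]
            try push_cast
            try ring
            try omega
      | true =>
        simp only [if_true]
        refine invAB_mk (by omega) (by omega) ?_ ?_ ?_ ?_ ?_ ?_ ?_
        · simp only [List.length_append, h3, hchunklen, List.length_cons, List.length_nil]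
          omega
        · rw [h4, hdropI, ← List.append_assoc,
            hins (emI ++ (sufI.drop pos.toNat).take (k + 1)) _ _
              (by simp only [List.length_append, h3, hchunklen]; omega)]
          rw [hdropI']
          simp
        · rw [h5, hdecK]
          have e : emK ++ (preK ++ PySem.Str.lower item :: restK) =
              (emK ++ (preK ++ [PySem.Str.lower item])) ++ restK := by simp
          rw [e, hins _ _ _
            (by simp only [List.length_append, List.length_cons, List.length_nil, hlenK]; omega)]
          rw [hdropK']
          simp
        · simp only [List.length_append, List.length_cons, List.length_nil]
          push_cast; omega
        · intro x
          rw [PySem.Set.mem_add, h7 x, hmemtot x, hdropK']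
          simp only [List.mem_append, List.mem_cons, List.not_mem_nil, or_false]
          tauto
        · intro x
          rw [hsetmem x]
          simp only [List.mem_append, List.mem_cons, List.not_mem_nil, or_false]
          tauto
        · intro x
          simp only [PySem.Dict.getD_insert, h9, hdropK', hdecK]
          by_cases hx : x = PySem.Str.lower item
          · subst hx
            simp [List.count_append]
            try push_cast
            try ring
            try omega
          · have hxx : ¬ PySem.Str.lower item = x := fun hh => hx hh.symm
            simp [List.count_append, hx, hxx]
            try push_cast
            try ring
            try omega
    · -- key unseen so far: both sides append the new item at the boundary
      have hset : PySem.Set.contains emSet (PySem.Str.lower item) = false := by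
        rw [← Bool.not_eq_true, PySem.Set.contains_iff]
        intro hc; exact hem ((h8 _).mp hc)
      have hseen : PySem.Set.contains seen (PySem.Str.lower item) = false := by
        rw [← Bool.not_eq_true, PySem.Set.contains_iff]
        intro hc
        rcases List.mem_append.mp ((h7 _).mp hc) with hx | hx
        · exact hem hx
        · exact hsufd hx
      have hcnt : ¬ (0 < cnt.getD (PySem.Str.lower item) 0) := by
        rw [h9]
        have : (emK ++ sufK.drop pos.toNat).count (PySem.Str.lower item) = 0 := by
          rw [List.count_eq_zero]
          intro hc
          rcases List.mem_append.mp hc with hx | hx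
          · exact hem hx
          · exact hsufd hx
        rw [this]
        simp
      have hins : ∀ (l1 l2 : List String) (v : String), l1.length = emK.length →
          PySem.List.insert (l1 ++ l2) idx v = l1 ++ v :: l2 := by
        intro l1 l2 v hl
        rw [h6, ← hl, PySem.List.insert_natCast _ _ _ (by simp), List.take_left, List.drop_left]
      simp only [pyStepA, stepB, hset, hseen, Bool.not_false, Bool.true_or, if_true,
        true_and, if_neg hcnt, Bool.false_eq_true, if_false]
      refine invAB_mk h1 h2 (by simp [h3]) ?_ ?_ ?_ ?_ ?_ ?_
      · rw [h4, hins _ _ _ h3]; simp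
      · rw [h5, hins _ _ _ rfl]; simp
      · simp only [List.length_append, List.length_cons, List.length_nil]
        push_cast; omega
      · intro x
        rw [PySem.Set.mem_add, h7 x]
        simp only [List.mem_append, List.mem_cons, List.not_mem_nil, or_false]
        tauto
      · intro x
        rw [PySem.Set.mem_add, h8 x]
        simp only [List.mem_append, List.mem_cons, List.not_mem_nil, or_false]
        try tauto
      · intro x
        simp only [PySem.Dict.getD_insert, h9]
        by_cases hx : x = PySem.Str.lower item
        · subst hx
          simp [List.count_append]
          try push_cast
          try ring
          try omega
        · have hxx : ¬ PySem.Str.lower item = x := fun hh => hx hh.symm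
          simp [List.count_append, hx, hxx]
          try push_cast
          try ring
          try omega

theorem foldl_inv (dup : Bool) (one_list : List String) (sufI sufK : List String)
    (hlen : sufI.length = sufK.length) :
    ∀ stA stB, InvAB sufI sufK stA stB →
      InvAB sufI sufK (one_list.foldl (pyStepA dup) stA)
        (one_list.foldl (stepB dup sufI sufK) stB) := by
  induction one_list with
  | nil => intro stA stB h; exact h
  | cons a t ih =>
    intro stA stB h
    exact ih _ _ (step_inv dup a sufI sufK hlen stA stB h)

-- The outer loop: processing the whole list_of_lists preserves the coupling between
-- A's (combined_items, combined_keys, seen_keys_set) and B's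
-- (combined_items, combined_keys, all_counts).
theorem outer_inv (dup : Bool) (lol : List (List String)) :
    ∀ (accA : List String × List String × PySem.Set String)
      (accB : List String × List String × PySem.Dict String Int),
      accA.1 = accB.1 → accA.2.1 = accB.2.1 → accB.1.length = accB.2.1.length →
      (∀ x, x ∈ accA.2.2 ↔ x ∈ accB.2.1) →
      (∀ x, accB.2.2.getD x 0 = ((accB.2.1.count x : Nat) : Int)) →
      (lol.foldl
          (fun acc one_list =>
            let r := one_list.foldl (pyStepA dup) (acc.1, acc.2.1, acc.2.2, (0 : Int))
            (r.1, r.2.1, r.2.2.1)) accA).1 =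
        (lol.foldl
          (fun acc one_list =>
            let r := one_list.foldl (stepB dup acc.1 acc.2.1)
              ([], [], PySem.Set.empty, (0 : Int), acc.2.2)
            (r.1 ++ PySem.List.slice acc.1 (some r.2.2.2.1) none,
             r.2.1 ++ PySem.List.slice acc.2.1 (some r.2.2.2.1) none,
             r.2.2.2.2)) accB).1 := by
  induction lol with
  | nil => intro accA accB ha _ _ _ _; exact ha
  | cons l ls ih =>
    intro accA accB ha hk hl hs hc
    have hinv : InvAB accB.1 accB.2.1 (accA.1, accA.2.1, accA.2.2, (0 : Int))
        ([], [], PySem.Set.empty, (0 : Int), accB.2.2) := by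
      refine invAB_mk (by simp) (by simp) rfl ?_ ?_ rfl ?_ ?_ ?_
      · simpa using ha
      · simpa using hk
      · intro x; simpa using hs x
      · intro x; simp [PySem.Set.empty]
      · intro x; simpa using hc x
    have hstep := foldl_inv dup l accB.1 accB.2.1 hl _ _ hinv
    obtain ⟨g1, g2, g3, g4, g5, g6, g7, g8, g9⟩ := hstep
    simp only [List.foldl_cons]
    apply ih
    · rw [PySem.List.slice_from accB.1 g1]
      exact g4
    · rw [PySem.List.slice_from accB.2.1 g1]
      exact g5
    · rw [PySem.List.slice_from accB.1 g1, PySem.List.slice_from accB.2.1 g1]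
      simp only [List.length_append, List.length_drop, g3, hl]
    · intro x
      rw [PySem.List.slice_from accB.2.1 g1]
      simpa using g7 x
    · intro x
      rw [PySem.List.slice_from accB.2.1 g1]
      simpa [List.count_append] using g9 x

-- ===== VERDICT (by name: the statement is the Claim_ definition above) =====
theorem CombineOrderedLists_py_spec : Claim_equal_CombineOrderedLists_py := by
  intro lol dup _
  show CombineOrderedLists_py lol dup = CombineOrderedLists_py_alt lol dup
  simp only [CombineOrderedLists_py, CombineOrderedLists_py_alt]
  exact outer_inv dup lol ([], [], PySem.Set.empty) ([], [], PySem.Dict.empty)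
    rfl rfl rfl (by intro x; simp [PySem.Set.empty])
    (by intro x; simp [PySem.Dict.empty, PySem.Dict.getD, PySem.Dict.get?])
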